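-- pv_equiv track=rewrite | github.com/igidae2026-creator/exit | metaos/runtime/oed_orchestrator.py | _exploration_depth
-- ===== SOURCE A (Python) =====
-- from typing import Any, Mapping
--
-- def _exploration_depth(history: list[Mapping[str, Any]]) -> int:
--     streak = 0
--     for row in reversed(history):
--         quest = row.get("quest", {}) if isinstance(row.get("quest"), Mapping) else {}
--         if str(quest.get("type", "")) != "exploration":
--             break
--         streak += 1
--     return streak
-- ===== SOURCE B (Python) =====
-- from typing import Any, Mapping
--
--
-- def _is_exploration(row: Mapping[str, Any]) -> bool:
--     quest = row.get("quest", {}) if isinstance(row.get("quest"), Mapping) else {}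
--     return str(quest.get("type", "")) == "exploration"
--
--
-- def _exploration_depth(history: list[Mapping[str, Any]]) -> int:
--     # Trailing streak = distance from the last non-exploration row to the end.
--     last_fail = -1
--     for i, row in enumerate(history):
--         if not _is_exploration(row):
--             last_fail = i
--     return len(history) - 1 - last_fail
-- ===== Notes on version B (the rewrite author's own statement) =====
-- stated objective: alternative
-- what changed: Replaces the backward early-break streak count with a forward full scan that records the index of the last non-exploration row and returns len(history) - 1 - last_fail.
import Mathlib
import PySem

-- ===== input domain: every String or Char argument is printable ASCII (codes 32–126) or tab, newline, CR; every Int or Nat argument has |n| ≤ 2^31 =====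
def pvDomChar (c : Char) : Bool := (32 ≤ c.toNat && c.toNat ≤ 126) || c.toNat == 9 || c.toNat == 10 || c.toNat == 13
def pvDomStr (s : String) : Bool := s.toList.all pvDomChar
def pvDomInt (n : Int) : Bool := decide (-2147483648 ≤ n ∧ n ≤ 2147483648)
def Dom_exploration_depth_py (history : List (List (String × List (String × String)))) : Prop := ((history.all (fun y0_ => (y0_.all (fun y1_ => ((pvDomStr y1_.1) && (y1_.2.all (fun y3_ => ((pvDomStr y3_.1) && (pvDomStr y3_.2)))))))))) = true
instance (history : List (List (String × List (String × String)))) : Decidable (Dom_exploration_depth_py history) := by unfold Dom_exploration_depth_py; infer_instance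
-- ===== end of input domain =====

-- B reframes A's backward early-break streak as a forward scan recording the last
-- non-exploration index (objective: alternative decomposition; same asymptotic cost).
-- At this Lean type every 'quest' value is a Mapping, so A's isinstance guard is identically true.

-- ===== PORT A =====
-- A's loop over reversed(history) with a running streak and an early break.
def pvLoopA : Int → List (List (String × List (String × String))) → Int
  | streak, [] => streak
  | streak, row :: rest =>
      let quest := (PySem.Dict.mk row).getD "quest" []
      if (PySem.Dict.mk quest).getD "type" "" ≠ "exploration" then streak
      else pvLoopA (streak + 1) rest

def exploration_depth_py (history : List (List (String × List (String × String)))) : Int :=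
  pvLoopA 0 history.reverse

-- ===== PORT B =====
def pvIsExploration (row : List (String × List (String × String))) : Bool :=
  let quest := (PySem.Dict.mk row).getD "quest" []
  (PySem.Dict.mk quest).getD "type" "" == "exploration"

def exploration_depth_py_alt (history : List (List (String × List (String × String)))) : Int :=
  let lastFail :=
    (PySem.List.enumerate history).foldl
      (fun lf p => if ¬ pvIsExploration p.2 then p.1 else lf) (-1)
  (history.length : Int) - 1 - lastFail

-- ===== PRECONDITION & SPEC =====
def Spec_exploration_depth_py (history : List (List (String × List (String × String)))) (out : Int) : Prop := out = exploration_depth_py_alt history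
instance (history : List (List (String × List (String × String)))) (out : Int) : Decidable (Spec_exploration_depth_py history out) := by unfold Spec_exploration_depth_py; infer_instance

-- ===== CLAIM (what is proved, stated in full; the proofs are below) =====
def Claim_equal_exploration_depth_py : Prop := ∀ (history : List (List (String × List (String × String)))), Dom_exploration_depth_py history → Spec_exploration_depth_py history (exploration_depth_py history)

-- ===== LEMMAS AND PROOFS =====

theorem pvLoopA_shift (s : Int) (l : List (List (String × List (String × String)))) :
    pvLoopA s l = s + pvLoopA 0 l := by
  induction l generalizing s with
  | nil => simp [pvLoopA]
  | cons r rest ih =>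
    simp only [pvLoopA]
    split
    · simp
    · rw [ih (s + 1), ih (0 + 1)]; ring

theorem main_eq (l : List (List (String × List (String × String)))) :
    pvLoopA 0 l.reverse
      = (l.length : Int) - 1 -
        (PySem.List.enumerate l).foldl
          (fun lf p => if ¬ pvIsExploration p.2 then p.1 else lf) (-1) := by
  induction l using List.reverseRecOn with
  | nil => simp [pvLoopA, PySem.List.enumerate_nil]
  | append_singleton l x ih =>
    rw [List.reverse_append, PySem.List.enumerate_append]
    simp only [List.reverse_singleton, List.singleton_append, List.foldl_append,
      PySem.List.enumerate_cons, PySem.List.enumerate_nil, List.foldl_cons, List.foldl_nil,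
      List.length_append, List.length_singleton]
    by_cases h : pvIsExploration x
    · have hx : pvLoopA 0 (x :: l.reverse) = pvLoopA (0 + 1) l.reverse := by
        simp only [pvLoopA]
        rw [if_neg (by simp only [pvIsExploration, beq_iff_eq] at h; exact not_not_intro h)]
      rw [hx, if_neg (by simp [h]), pvLoopA_shift, ih]
      push_cast
      ring
    · have hx : pvLoopA 0 (x :: l.reverse) = 0 := by
        simp only [pvLoopA]
        rw [if_pos (by simpa [pvIsExploration] using h)]
      rw [hx, if_pos (by simpa using h)]
      push_cast
      ring

-- ===== VERDICT (by name: the statement is the Claim_ definition above) =====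
theorem exploration_depth_py_spec : Claim_equal_exploration_depth_py := by
  intro history _
  show exploration_depth_py history = exploration_depth_py_alt history
  simp only [exploration_depth_py, exploration_depth_py_alt]
  exact main_eq history
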